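-- pv_equiv track=rewrite | github.com/SahilKayasth-16/Urban-GIS-AI | backend/app/routes/ai_chat.py | is_decision_query
-- ===== SOURCE A (Python) =====
-- def is_decision_query(text: str) -> bool:
--     triggers = [
--         "good decision", "should i", "is it good",
--         "is it feasible", "is it worth", "worth opening",
--         "better to", "recommend", "suggestion", "is it a good idea"
--     ]
--     text = text.lower()
--     return any(t in text for t in triggers)
-- ===== SOURCE B (Python) =====
-- _TRIGGERS = (
--     "good decision", "should i", "is it good",
--     "is it feasible", "is it worth", "worth opening",
--     "better to", "recommend", "suggestion", "is it a good idea",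
-- )
--
-- def is_decision_query(text: str) -> bool:
--     s = text.lower()
--     for i in range(len(s)):
--         for t in _TRIGGERS:
--             if s.startswith(t, i):
--                 return True
--     return False
-- ===== Notes on version B (the rewrite author's own statement) =====
-- stated objective: alternative
-- what changed: Instead of rescanning the whole text once per trigger with substring membership tests, B lowers the text once and makes a single left-to-right sweep over positions, testing at each position whether any trigger starts there and returning at the first hit.
import Mathlib
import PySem

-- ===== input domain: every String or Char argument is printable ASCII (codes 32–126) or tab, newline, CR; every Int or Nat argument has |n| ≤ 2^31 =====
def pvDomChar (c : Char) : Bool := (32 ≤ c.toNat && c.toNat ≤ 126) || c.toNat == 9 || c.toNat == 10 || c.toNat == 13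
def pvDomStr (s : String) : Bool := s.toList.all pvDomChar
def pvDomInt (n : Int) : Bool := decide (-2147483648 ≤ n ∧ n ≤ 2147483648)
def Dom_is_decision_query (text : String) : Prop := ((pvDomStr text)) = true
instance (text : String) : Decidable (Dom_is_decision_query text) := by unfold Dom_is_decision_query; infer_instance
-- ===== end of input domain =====

-- B replaces A's per-trigger rescans of the text with a single left-to-right sweep over
-- positions, testing each trigger with startswith at the current offset (objective: alternative).

-- ===== PORT A =====
-- the trigger list of A, verbatim
def triggersA : List String :=
  ["good decision", "should i", "is it good",
   "is it feasible", "is it worth", "worth opening",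
   "better to", "recommend", "suggestion", "is it a good idea"]

def is_decision_query (text : String) : Bool :=
  let text := PySem.Str.lower text
  triggersA.any (fun t => PySem.Str.isIn t text)

-- ===== PORT B =====
-- the same trigger list, as char lists (B scans the lowered text as a char sequence)
def triggersB : List (List Char) :=
  ["good decision".toList, "should i".toList, "is it good".toList,
   "is it feasible".toList, "is it worth".toList, "worth opening".toList,
   "better to".toList, "recommend".toList, "suggestion".toList, "is it a good idea".toList]

-- the position loop of Source B: advance one character at a time, testing s.startswith(t, i)
def scanB : List Char → Bool
  | [] => false
  | c :: rest =>
    if triggersB.any (fun t => PySem.Chars.startswith (c :: rest) t) then true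
    else scanB rest

def is_decision_query_alt (text : String) : Bool :=
  scanB (PySem.Chars.lower text.toList)

-- ===== PRECONDITION & SPEC =====
def Spec_is_decision_query (text : String) (out : Bool) : Prop := out = is_decision_query_alt text
instance (text : String) (out : Bool) : Decidable (Spec_is_decision_query text out) := by unfold Spec_is_decision_query; infer_instance

-- ===== CLAIM (what is proved, stated in full; the proofs are below) =====
def Claim_equal_is_decision_query : Prop := ∀ (text : String), Dom_is_decision_query text → Spec_is_decision_query text (is_decision_query text)

-- ===== LEMMAS AND PROOFS =====

-- the sweep finds a trigger iff some trigger is an infix (i.e. `t in s`)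
theorem scanB_eq_any_isIn (s : List Char) :
    scanB s = triggersB.any (fun t => PySem.Chars.isIn t s) := by
  induction s with
  | nil => decide
  | cons c rest ih =>
    rw [Bool.eq_iff_iff]
    simp only [scanB, List.any_eq_true, PySem.Chars.isIn_iff_infix,
      PySem.Chars.startswith_iff, List.infix_cons_iff, ih]
    by_cases h : ∃ t ∈ triggersB, t <+: c :: rest
    · obtain ⟨t, ht, hp⟩ := h
      simp only [iff_true_intro (⟨t, ht, hp⟩ : ∃ t ∈ triggersB, t <+: c :: rest), if_true]
      exact iff_of_true (by trivial) ⟨t, ht, Or.inl hp⟩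
    · simp only [h, if_false, List.any_eq_true, PySem.Chars.isIn_iff_infix]
      exact ⟨fun ⟨t, ht, hi⟩ => ⟨t, ht, Or.inr hi⟩,
             fun ⟨t, ht, hi⟩ => ⟨t, ht, hi.resolve_left (fun hp => h ⟨t, ht, hp⟩)⟩⟩

theorem is_decision_query_spec : Claim_equal_is_decision_query := by
  intro text _
  unfold Spec_is_decision_query is_decision_query is_decision_query_alt
  rw [scanB_eq_any_isIn]
  simp [triggersA, triggersB, PySem.Str.isIn_eq, PySem.Str.lower]
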